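-- pv_equiv track=rewrite | github.com/Xinyi-Lai/CS411_Geniuses | py/apriori.py | checkFreq
-- ===== SOURCE A (Python) =====
-- def str2set(astr):
--     return set(astr.split())
--
-- def checkFreq(cand, patterns, minsup, database):
--     freq = []
--     for candidate in cand:
--         # scan DB and get the support of the candidate
--         sup = 0
--         candidate_set = str2set(candidate)
--         for transaction in database:
--             if candidate_set.issubset(set(transaction)):
--                 sup += 1
--         # check against minsup
--         if sup >= minsup:
--             freq.append(candidate)
--             patterns[candidate] = sup
--         freq.sort()
--     return freq
-- ===== SOURCE B (Python) =====
-- def checkFreq(cand, patterns, minsup, database):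
--     # inverted index: item -> set of transaction ids containing it; support of a
--     # candidate is the size of the intersection of its items' tidsets.
--     index = {}
--     for i, transaction in enumerate(database):
--         for item in transaction:
--             index.setdefault(item, set()).add(i)
--     freq = []
--     for candidate in cand:
--         items = candidate.split()
--         if not items:
--             sup = len(database)
--         else:
--             tids = index.get(items[0], set())
--             for item in items[1:]:
--                 tids = tids & index.get(item, set())
--             sup = len(tids)
--         if sup >= minsup:
--             freq.append(candidate)
--             patterns[candidate] = sup
--     freq.sort()
--     return freq
-- ===== Notes on version B (the rewrite author's own statement) =====
-- stated objective: faster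
-- what changed: Replaces A's per-candidate scan of the whole database (subset test against each transaction, re-sorting freq after every candidate) with an inverted index built in one database pass (item -> set of transaction ids); each candidate's support is then the size of the intersection of its items' tidsets, and the result list is sorted once at the end.
import Mathlib
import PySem

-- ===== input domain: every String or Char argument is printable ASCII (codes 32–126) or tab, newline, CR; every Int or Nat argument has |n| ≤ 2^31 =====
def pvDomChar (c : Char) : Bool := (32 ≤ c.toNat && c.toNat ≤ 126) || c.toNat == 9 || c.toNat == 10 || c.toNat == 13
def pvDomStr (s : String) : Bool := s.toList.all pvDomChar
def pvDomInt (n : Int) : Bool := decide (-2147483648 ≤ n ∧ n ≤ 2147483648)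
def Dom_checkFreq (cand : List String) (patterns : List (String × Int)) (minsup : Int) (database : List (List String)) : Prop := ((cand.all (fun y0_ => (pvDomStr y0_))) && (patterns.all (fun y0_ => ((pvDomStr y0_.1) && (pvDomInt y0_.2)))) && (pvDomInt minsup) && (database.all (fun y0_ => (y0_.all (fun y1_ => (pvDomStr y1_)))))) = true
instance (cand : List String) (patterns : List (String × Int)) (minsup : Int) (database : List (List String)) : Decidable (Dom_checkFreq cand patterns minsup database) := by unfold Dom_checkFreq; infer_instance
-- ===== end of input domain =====

-- B replaces A's candidate-by-candidate database scan with an inverted index (item -> set of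
-- transaction ids): one pass builds the index, then each candidate's support is the size of the
-- intersection of its items' tidsets, and the result is sorted once at the end instead of A's
-- re-sort after every candidate.
-- Both Pythons mutate the dict `patterns` identically; the equivalence proved here is about the
-- RETURN value only.

-- ===== PORT A =====
def str2set (astr : String) : PySem.Set String := PySem.Set.ofList (PySem.Str.split₀ astr)

def checkFreq (cand : List String) (patterns : List (String × Int)) (minsup : Int) (database : List (List String)) : List String :=
  cand.foldl (fun freq candidate =>
    let candidate_set := str2set candidate
    let sup : Int := database.foldl (fun sup transaction =>
      if PySem.Set.issubset candidate_set (PySem.Set.ofList transaction) then sup + 1 else sup) 0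
    let freq := if sup ≥ minsup then freq ++ [candidate] else freq
    PySem.List.sorted freq (fun x => x) false) []

-- ===== PORT B =====
-- index.setdefault(item, set()).add(i) is PySem.Dict.modify item Set.empty (·.add i)
def buildIndex (database : List (List String)) : PySem.Dict String (PySem.Set Int) :=
  database.zipIdx.foldl (fun idx p =>
    p.1.foldl (fun idx item =>
      idx.modify item PySem.Set.empty (fun s => PySem.Set.add s (p.2 : Int))) idx)
    PySem.Dict.empty

-- the per-candidate support: len(database) for an empty item list, else the size of the
-- intersection of the items' tidsets (index.get(item, set()))
def candSup (idx : PySem.Dict String (PySem.Set Int)) (n : Int) (candidate : String) : Int :=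
  match PySem.Str.split₀ candidate with
  | [] => n
  | it0 :: rest =>
    ((rest.foldl (fun tids item => PySem.Set.inter tids (idx.getD item PySem.Set.empty))
        (idx.getD it0 PySem.Set.empty)).length : Int)

def checkFreq_alt (cand : List String) (patterns : List (String × Int)) (minsup : Int) (database : List (List String)) : List String :=
  let idx := buildIndex database
  let freq := cand.foldl (fun freq candidate =>
    let sup := candSup idx (database.length : Int) candidate
    if sup ≥ minsup then freq ++ [candidate] else freq) []
  PySem.List.sorted freq (fun x => x) false

-- ===== PRECONDITION & SPEC =====
def Spec_checkFreq (cand : List String) (patterns : List (String × Int)) (minsup : Int) (database : List (List String)) (out : List String) : Prop := out = checkFreq_alt cand patterns minsup database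
instance (cand : List String) (patterns : List (String × Int)) (minsup : Int) (database : List (List String)) (out : List String) : Decidable (Spec_checkFreq cand patterns minsup database out) := by unfold Spec_checkFreq; infer_instance

-- ===== CLAIM (what is proved, stated in full; the proofs are below) =====
def Claim_equal_checkFreq : Prop := ∀ (cand : List String) (patterns : List (String × Int)) (minsup : Int) (database : List (List String)), Dom_checkFreq cand patterns minsup database → Spec_checkFreq cand patterns minsup database (checkFreq cand patterns minsup database)

-- ===== LEMMAS AND PROOFS =====

-- support of candidate c in database (count of transactions whose set contains c's item set)
def supC (database : List (List String)) (c : String) : Int :=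
  (database.countP (fun t => PySem.Set.issubset (str2set c) (PySem.Set.ofList t)) : Int)

-- ---------- A's loop in normal form: one sort of the filtered candidate list ----------
lemma A_fold (minsup : Int) (database : List (List String)) :
    ∀ (cand : List String) (acc : List String),
    cand.foldl (fun freq candidate =>
        let candidate_set := str2set candidate
        let sup : Int := database.foldl (fun sup transaction =>
          if PySem.Set.issubset candidate_set (PySem.Set.ofList transaction) then sup + 1 else sup) 0
        let freq := if sup ≥ minsup then freq ++ [candidate] else freq
        PySem.List.sorted freq (fun x => x) false)
      (PySem.List.sorted acc (fun x => x) false)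
    = PySem.List.sorted (acc ++ cand.filter (fun c => decide (supC database c ≥ minsup))) (fun x => x) false := by
  intro cand
  induction cand with
  | nil => intro acc; simp
  | cons c cs ih =>
    intro acc
    rw [List.foldl_cons]
    have hsup : database.foldl (fun sup transaction =>
        if PySem.Set.issubset (str2set c) (PySem.Set.ofList transaction) then sup + 1 else sup) (0:Int)
        = supC database c := by
      rw [PySem.List.foldl_if_add_one]; simp [supC]
    simp only [hsup]
    by_cases hc : supC database c ≥ minsup
    · have h1 : PySem.List.sorted (PySem.List.sorted acc (fun x => x) false ++ [c]) (fun x => x) false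
          = PySem.List.sorted (acc ++ [c]) (fun x => x) false := by
        exact PySem.List.sorted_eq_sorted_of_perm _ _ _ (fun a b h => h)
          ((PySem.List.sorted_perm acc (fun x => x) false).append_right _)
      simp only [if_true, h1, ih (acc ++ [c]), List.filter_cons, hc, decide_true,
        List.append_assoc, List.singleton_append]
    · simp only [hc, if_false, PySem.List.sorted_sorted, ih acc]
      simp [hc]

lemma checkFreq_eq (cand : List String) (patterns : List (String × Int)) (minsup : Int) (database : List (List String)) :
    checkFreq cand patterns minsup database
    = PySem.List.sorted (cand.filter (fun c => decide (supC database c ≥ minsup))) (fun x => x) false := by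
  have h := A_fold minsup database cand []
  simpa [checkFreq] using h

-- ---------- B's inverted index, characterised by membership ----------

-- inner loop (one transaction): what ends up in each tidset
lemma inner_mem (i : Nat) :
    ∀ (t : List String) (d : PySem.Dict String (PySem.Set Int)) (x : String) (j : Int),
    (j ∈ (t.foldl (fun d item =>
        d.modify item PySem.Set.empty (fun s => PySem.Set.add s (i : Int))) d).getD x PySem.Set.empty)
    ↔ j ∈ d.getD x PySem.Set.empty ∨ (x ∈ t ∧ j = (i : Int)) := by
  intro t
  induction t with
  | nil => intro d x j; simp
  | cons a t ih =>
    intro d x j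
    rw [List.foldl_cons, ih]
    rw [PySem.Dict.getD_modify]
    by_cases hx : x = a
    · subst hx
      rw [if_pos rfl]
      simp only [PySem.Set.mem_add, List.mem_cons]
      tauto
    · rw [if_neg hx]
      simp only [List.mem_cons]
      tauto

lemma inner_nodup (i : Nat) :
    ∀ (t : List String) (d : PySem.Dict String (PySem.Set Int)),
    (∀ x, (d.getD x PySem.Set.empty).Nodup) →
    ∀ x, ((t.foldl (fun d item =>
        d.modify item PySem.Set.empty (fun s => PySem.Set.add s (i : Int))) d).getD x PySem.Set.empty).Nodup := by
  intro t
  induction t with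
  | nil => intro d hd x; exact hd x
  | cons a t ih =>
    intro d hd x
    rw [List.foldl_cons]
    apply ih
    intro y
    rw [PySem.Dict.getD_modify]
    by_cases hy : y = a
    · simp only [hy, if_true]
      exact PySem.Set.nodup_add _ _ (hd a)
    · simp only [hy, if_false]
      exact hd y

-- outer loop (all enumerated transactions)
lemma outer_mem :
    ∀ (L : List (List String × Nat)) (d : PySem.Dict String (PySem.Set Int)) (x : String) (j : Int),
    (j ∈ (L.foldl (fun idx p =>
        p.1.foldl (fun idx item =>
          idx.modify item PySem.Set.empty (fun s => PySem.Set.add s (p.2 : Int))) idx) d).getD x PySem.Set.empty)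
    ↔ j ∈ d.getD x PySem.Set.empty ∨ ∃ p ∈ L, x ∈ p.1 ∧ j = (p.2 : Int) := by
  intro L
  induction L with
  | nil => intro d x j; simp
  | cons p L ih =>
    intro d x j
    rw [List.foldl_cons, ih, inner_mem]
    constructor
    · rintro (⟨h1 | h2⟩ | ⟨q, hq, hx, hj⟩)
      · exact Or.inl h1
      · exact Or.inr ⟨p, List.mem_cons_self, h2.1, h2.2⟩
      · exact Or.inr ⟨q, List.mem_cons_of_mem _ hq, hx, hj⟩
    · rintro (h1 | ⟨q, hq, hx, hj⟩)
      · exact Or.inl (Or.inl h1)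
      · rcases List.mem_cons.mp hq with hq | hq
        · subst hq; exact Or.inl (Or.inr ⟨hx, hj⟩)
        · exact Or.inr ⟨q, hq, hx, hj⟩

lemma outer_nodup :
    ∀ (L : List (List String × Nat)) (d : PySem.Dict String (PySem.Set Int)),
    (∀ x, (d.getD x PySem.Set.empty).Nodup) →
    ∀ x, ((L.foldl (fun idx p =>
        p.1.foldl (fun idx item =>
          idx.modify item PySem.Set.empty (fun s => PySem.Set.add s (p.2 : Int))) idx) d).getD x PySem.Set.empty).Nodup := by
  intro L
  induction L with
  | nil => intro d hd x; exact hd x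
  | cons p L ih =>
    intro d hd x
    rw [List.foldl_cons]
    exact ih _ (inner_nodup p.2 p.1 d hd) x

lemma mem_buildIndex (database : List (List String)) (x : String) (j : Int) :
    j ∈ (buildIndex database).getD x PySem.Set.empty
    ↔ ∃ p ∈ database.zipIdx, x ∈ p.1 ∧ j = (p.2 : Int) := by
  unfold buildIndex
  rw [outer_mem]
  simp

lemma nodup_buildIndex (database : List (List String)) (x : String) :
    ((buildIndex database).getD x PySem.Set.empty).Nodup := by
  unfold buildIndex
  apply outer_nodup
  intro y
  simp

-- ---------- the intersection loop ----------
lemma inter_mem (idx : PySem.Dict String (PySem.Set Int)) :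
    ∀ (rest : List String) (s0 : PySem.Set Int) (j : Int),
    (j ∈ rest.foldl (fun tids item => PySem.Set.inter tids (idx.getD item PySem.Set.empty)) s0)
    ↔ j ∈ s0 ∧ ∀ item ∈ rest, j ∈ idx.getD item PySem.Set.empty := by
  intro rest
  induction rest with
  | nil => intro s0 j; simp
  | cons a rest ih =>
    intro s0 j
    rw [List.foldl_cons, ih]
    rw [PySem.Set.mem_inter]
    simp only [List.mem_cons]
    constructor
    · rintro ⟨⟨h1, h2⟩, h3⟩
      refine ⟨h1, ?_⟩
      intro item hitem
      rcases hitem with h' | h'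
      · subst h'; exact h2
      · exact h3 item h'
    · rintro ⟨h1, h2⟩
      exact ⟨⟨h1, h2 a (Or.inl rfl)⟩, fun item h' => h2 item (Or.inr h')⟩

lemma inter_nodup (idx : PySem.Dict String (PySem.Set Int)) :
    ∀ (rest : List String) (s0 : PySem.Set Int), s0.Nodup →
    (rest.foldl (fun tids item => PySem.Set.inter tids (idx.getD item PySem.Set.empty)) s0).Nodup := by
  intro rest
  induction rest with
  | nil => intro s0 h; exact h
  | cons a rest ih =>
    intro s0 h
    rw [List.foldl_cons]
    exact ih _ (List.Nodup.filter _ h)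

-- zipIdx facts
lemma zipIdx_nodup {α : Type} (l : List α) : ∀ (k : Nat), (l.zipIdx k).Nodup := by
  induction l with
  | nil => intro k; simp
  | cons a t ih =>
    intro k
    rw [List.zipIdx_cons]
    refine List.Nodup.cons ?_ (ih (k+1))
    intro h
    have := List.mem_zipIdx h
    omega

lemma zipIdx_snd_inj {α : Type} (l : List α) (p q : α × Nat)
    (hp : p ∈ l.zipIdx) (hq : q ∈ l.zipIdx) (h : p.2 = q.2) : p = q := by
  have hp' := List.mem_zipIdx_iff_getElem?.mp hp
  have hq' := List.mem_zipIdx_iff_getElem?.mp hq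
  rw [h] at hp'
  rw [hp'] at hq'
  exact Prod.ext (Option.some.inj hq') h

lemma countP_zipIdx {α : Type} (Q : α → Bool) (l : List α) :
    ∀ (k : Nat), (l.zipIdx k).countP (fun p => Q p.1) = l.countP Q := by
  induction l with
  | nil => intro k; simp
  | cons a t ih =>
    intro k
    rw [List.zipIdx_cons, List.countP_cons, List.countP_cons, ih]

-- ---------- B's support equals A's support ----------
lemma candSup_eq (database : List (List String)) (c : String) :
    candSup (buildIndex database) (database.length : Int) c = supC database c := by
  cases h : PySem.Str.split₀ c with
  | nil =>
    have hred : candSup (buildIndex database) (database.length : Int) c = (database.length : Int) := by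
      unfold candSup; rw [h]
    rw [hred]
    simp only [supC, str2set, h]
    have hc : database.countP
        (fun t => PySem.Set.issubset (PySem.Set.ofList ([] : List String)) (PySem.Set.ofList t))
        = database.length := List.countP_eq_length.mpr (fun a _ => rfl)
    rw [hc]
  | cons it0 rest =>
    have hred : candSup (buildIndex database) (database.length : Int) c
        = ((rest.foldl (fun tids item =>
            PySem.Set.inter tids ((buildIndex database).getD item PySem.Set.empty))
            ((buildIndex database).getD it0 PySem.Set.empty)).length : Int) := by
      unfold candSup; rw [h]
    set idx := buildIndex database with hidx
    set tids := rest.foldl (fun tids item => PySem.Set.inter tids (idx.getD item PySem.Set.empty))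
        (idx.getD it0 PySem.Set.empty) with htids
    set q : List String × Nat → Bool :=
      fun p => (it0 :: rest).all (fun item => decide (item ∈ p.1)) with hq
    set canon : List Int := (database.zipIdx.filter q).map (fun p => ((p.2 : Nat) : Int)) with hcanon
    have hperm : tids.Perm canon := by
      rw [List.perm_ext_iff_of_nodup]
      · intro j
        rw [htids, inter_mem]
        simp only [hidx]
        rw [mem_buildIndex]
        constructor
        · rintro ⟨⟨p, hp, hx0, hj0⟩, hrest⟩
          have hall : ∀ item ∈ it0 :: rest, item ∈ p.1 := by
            intro item hitem
            rcases List.mem_cons.mp hitem with h' | h'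
            · subst h'; exact hx0
            · obtain ⟨p', hp', hx', hj'⟩ := (mem_buildIndex database item j).mp (hrest item h')
              have : p' = p := by
                apply zipIdx_snd_inj database p' p hp' hp
                omega
              rw [← this]; exact hx'
          rw [hcanon]
          simp only [List.mem_map, List.mem_filter]
          refine ⟨p, ⟨hp, ?_⟩, hj0.symm⟩
          simp only [hq, List.all_eq_true, decide_eq_true_eq]
          exact hall
        · intro hj
          rw [hcanon] at hj
          simp only [List.mem_map, List.mem_filter] at hj
          obtain ⟨p, ⟨hp, hqp⟩, hj⟩ := hj
          simp only [hq, List.all_eq_true, decide_eq_true_eq] at hqp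
          constructor
          · exact ⟨p, hp, hqp it0 List.mem_cons_self, hj.symm⟩
          · intro item hitem
            rw [mem_buildIndex]
            exact ⟨p, hp, hqp item (List.mem_cons_of_mem _ hitem), hj.symm⟩
      · rw [htids]
        exact inter_nodup idx rest _ (by rw [hidx]; exact nodup_buildIndex database it0)
      · rw [hcanon]
        apply List.Nodup.map_on
        · intro p hp p' hp' hpp
          apply zipIdx_snd_inj database p p'
            (List.mem_of_mem_filter hp) (List.mem_of_mem_filter hp')
          omega
        · exact List.Nodup.filter _ (zipIdx_nodup database 0)
    have hlen : tids.length = database.countP (fun t => q (t, 0)) := by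
      rw [hperm.length_eq, hcanon, List.length_map, ← List.countP_eq_length_filter]
      have := countP_zipIdx (fun t : List String => q (t, 0)) database 0
      rw [← this]
    rw [hred, hlen]
    simp only [supC, str2set, h]
    congr 1
    apply List.countP_congr
    intro t _
    simp only [hq, PySem.Set.issubset, List.all_eq_true, decide_eq_true_eq,
      PySem.Set.contains_eq_decide, PySem.Set.mem_ofList]

lemma checkFreq_alt_eq (cand : List String) (patterns : List (String × Int)) (minsup : Int) (database : List (List String)) :
    checkFreq_alt cand patterns minsup database
    = PySem.List.sorted (cand.filter (fun c => decide (supC database c ≥ minsup))) (fun x => x) false := by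
  unfold checkFreq_alt
  simp only [candSup_eq]
  rw [PySem.List.foldl_append_ite_eq_filter]
  simp

-- ===== VERDICT (by name: the statement is the Claim_ definition above) =====
theorem checkFreq_spec : Claim_equal_checkFreq := by
  intro cand patterns minsup database _
  unfold Spec_checkFreq
  rw [checkFreq_eq, checkFreq_alt_eq]
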